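-- pv_equiv track=rewrite | github.com/chiboreache/test_job_full | _2_inference/eval_cv.py | get_frame_number
-- ===== SOURCE A (Python) =====
-- def is_in_xyxy(point_x, point_y, box_x, box_y, box_xx, box_yy):
--     p1 = box_x <= point_x <= box_xx
--     p2 = box_y <= point_y <= box_yy
--     return p1 and p2
--
-- def get_frame_number(pt, trains):
--     frame = None
--     pad = 8
--     for i, box in enumerate(trains):
--         extended_box = [box[0] - pad, box[1] - pad, box[2] + pad, box[3] + pad]
--         q = is_in_xyxy(*pt, *extended_box)
--         if q:
--             frame = i + 1
--     return frame
-- ===== SOURCE B (Python) =====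
-- def get_frame_number(pt, trains):
--     pad = 8
--     for i in range(len(trains) - 1, -1, -1):
--         box = trains[i]
--         if (box[0] - pad <= pt[0] <= box[2] + pad
--                 and box[1] - pad <= pt[1] <= box[3] + pad):
--             return i + 1
--     return None
-- ===== Notes on version B (the rewrite author's own statement) =====
-- stated objective: alternative
-- what changed: B scans the boxes in reverse and returns i+1 at the first padded box containing the point (early return, no accumulator), instead of A's forward scan that keeps overwriting a 'frame' accumulator and returns the last hit.
import Mathlib
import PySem

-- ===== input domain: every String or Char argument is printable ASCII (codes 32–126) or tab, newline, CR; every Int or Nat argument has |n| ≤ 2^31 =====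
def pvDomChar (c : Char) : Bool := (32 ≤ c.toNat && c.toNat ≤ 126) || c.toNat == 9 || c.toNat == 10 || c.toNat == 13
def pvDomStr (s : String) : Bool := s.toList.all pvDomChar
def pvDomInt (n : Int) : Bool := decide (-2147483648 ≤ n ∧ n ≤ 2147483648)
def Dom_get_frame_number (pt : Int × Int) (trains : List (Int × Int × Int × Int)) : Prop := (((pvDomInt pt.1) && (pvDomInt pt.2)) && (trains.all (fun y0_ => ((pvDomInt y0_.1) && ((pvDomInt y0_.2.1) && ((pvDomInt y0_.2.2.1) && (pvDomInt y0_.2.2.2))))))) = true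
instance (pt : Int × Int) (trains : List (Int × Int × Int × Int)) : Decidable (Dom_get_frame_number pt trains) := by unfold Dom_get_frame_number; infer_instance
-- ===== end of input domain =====

-- B iterates the boxes in REVERSE and returns i+1 at the first padded box containing the
-- point (early return, no accumulator), instead of A's forward scan keeping the last hit.

-- ===== PORT A =====
-- Python helper is_in_xyxy: inclusive chained comparisons
def is_in_xyxy (px py bx bY bxx byy : Int) : Bool :=
  ((bx ≤ px && px ≤ bxx)) && ((bY ≤ py && py ≤ byy))

-- A's loop: 'for i, box in enumerate(trains): … if q: frame = i + 1'
def pvAGo (pt : Int × Int) : List (Int × Int × Int × Int) → Option Int → Int → Option Int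
  | [], frame, _ => frame
  | b :: rest, frame, i =>
      pvAGo pt rest
        (if is_in_xyxy pt.1 pt.2 (b.1 - 8) (b.2.1 - 8) (b.2.2.1 + 8) (b.2.2.2 + 8)
         then some (i + 1) else frame) (i + 1)

def get_frame_number (pt : Int × Int) (trains : List (Int × Int × Int × Int)) : Option Int :=
  pvAGo pt trains none 0

-- ===== PORT B =====
-- B's loop: 'for i in range(len(trains)-1, -1, -1): … return i+1' — walk the reversed
-- list carrying the current index i, returning at the first hit.
def pvBGo (pt : Int × Int) : List (Int × Int × Int × Int) → Int → Option Int
  | [], _ => none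
  | b :: rest, i =>
      if (b.1 - 8 ≤ pt.1 && pt.1 ≤ b.2.2.1 + 8) && (b.2.1 - 8 ≤ pt.2 && pt.2 ≤ b.2.2.2 + 8)
      then some (i + 1) else pvBGo pt rest (i - 1)

def get_frame_number_alt (pt : Int × Int) (trains : List (Int × Int × Int × Int)) : Option Int :=
  pvBGo pt trains.reverse ((trains.length : Int) - 1)

-- ===== PRECONDITION & SPEC =====
def Spec_get_frame_number (pt : Int × Int) (trains : List (Int × Int × Int × Int)) (out : Option Int) : Prop := out = get_frame_number_alt pt trains
instance (pt : Int × Int) (trains : List (Int × Int × Int × Int)) (out : Option Int) : Decidable (Spec_get_frame_number pt trains out) := by unfold Spec_get_frame_number; infer_instance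

-- ===== CLAIM (what is proved, stated in full; the proofs are below) =====
def Claim_equal_get_frame_number : Prop := ∀ (pt : Int × Int) (trains : List (Int × Int × Int × Int)), Dom_get_frame_number pt trains → Spec_get_frame_number pt trains (get_frame_number pt trains)

-- ===== LEMMAS AND PROOFS =====

-- the two hit tests coincide
lemma hit_eq (pt : Int × Int) (b : Int × Int × Int × Int) :
    is_in_xyxy pt.1 pt.2 (b.1 - 8) (b.2.1 - 8) (b.2.2.1 + 8) (b.2.2.2 + 8)
      = ((b.1 - 8 ≤ pt.1 && pt.1 ≤ b.2.2.1 + 8) && (b.2.1 - 8 ≤ pt.2 && pt.2 ≤ b.2.2.2 + 8)) := by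
  simp [is_in_xyxy]

-- appending one box: the last element decides the final accumulator
lemma pvAGo_append (pt : Int × Int) (xs : List (Int × Int × Int × Int))
    (b : Int × Int × Int × Int) (frame : Option Int) (i : Int) :
    pvAGo pt (xs ++ [b]) frame i =
      if is_in_xyxy pt.1 pt.2 (b.1 - 8) (b.2.1 - 8) (b.2.2.1 + 8) (b.2.2.2 + 8)
      then some (i + (xs.length : Int) + 1) else pvAGo pt xs frame i := by
  induction xs generalizing frame i with
  | nil => simp [pvAGo]
  | cons c cs ih =>
      simp only [List.cons_append, pvAGo, ih, List.length_cons]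
      have : i + 1 + (cs.length : Int) + 1 = i + ((cs.length : Int) + 1) + 1 := by ring
      rw [this]; push_cast; ring_nf

-- forward-scan-with-accumulator = reverse-scan-first-hit, with 'or' for the accumulator
lemma pvAGo_eq_pvBGo (pt : Int × Int) (xs : List (Int × Int × Int × Int)) :
    ∀ (frame : Option Int) (i : Int),
      pvAGo pt xs frame i = (pvBGo pt xs.reverse (i + (xs.length : Int) - 1)).or frame := by
  induction xs using List.reverseRecOn with
  | nil => intro frame i; simp [pvAGo, pvBGo]
  | append_singleton xs b ih =>
      intro frame i
      rw [pvAGo_append, List.reverse_append]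
      simp only [List.reverse_singleton, List.singleton_append, pvBGo, List.length_append,
        List.length_singleton, hit_eq]
      push_cast
      rw [show i + ((xs.length : Int) + 1) - 1 = i + (xs.length : Int) by ring]
      split
      · simp
      · rw [ih frame i]

-- ===== VERDICT (by name: the statement is the Claim_ definition above) =====
theorem get_frame_number_spec : Claim_equal_get_frame_number := by
  intro pt trains _
  show get_frame_number pt trains = get_frame_number_alt pt trains
  rw [get_frame_number, get_frame_number_alt, pvAGo_eq_pvBGo]
  rw [show (0 : Int) + (trains.length : Int) - 1 = (trains.length : Int) - 1 by ring]
  cases pvBGo pt trains.reverse ((trains.length : Int) - 1) <;> simp [Option.or]
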